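-- pv_equiv track=rewrite | github.com/J35P312/AOC2017 | jesper/D6/D6_1.py | update_memory
-- ===== SOURCE A (Python) =====
-- def update_memory(memory,i):
-- 	blocks=memory[i]
-- 	memory[i]=0
-- 	i+=1
-- 	if i == len(memory):
-- 		i=0
--
-- 	for b in range(0,blocks):
--
-- 		memory[i]+=1
-- 		i+=1
-- 		if i == len(memory):
-- 			i=0
--
--
-- 	return(memory)
-- ===== SOURCE B (Python) =====
-- def update_memory(memory, i):
--     n = len(memory)
--     blocks = memory[i]
--     memory[i] = 0
--     if blocks > 0:
--         q, r = divmod(blocks, n)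
--         start = (i + 1) % n
--         for j in range(n):
--             memory[(start + j) % n] += q + (1 if j < r else 0)
--     return memory
-- ===== Notes on version B (the rewrite author's own statement) =====
-- stated objective: alternative
-- what changed: A distributes the blocks one at a time around the ring (one loop iteration per block); B computes the distribution in closed form, adding blocks//n to every cell in a single pass over the n cells plus one extra unit to the first blocks%n cells after i.
import Mathlib
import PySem

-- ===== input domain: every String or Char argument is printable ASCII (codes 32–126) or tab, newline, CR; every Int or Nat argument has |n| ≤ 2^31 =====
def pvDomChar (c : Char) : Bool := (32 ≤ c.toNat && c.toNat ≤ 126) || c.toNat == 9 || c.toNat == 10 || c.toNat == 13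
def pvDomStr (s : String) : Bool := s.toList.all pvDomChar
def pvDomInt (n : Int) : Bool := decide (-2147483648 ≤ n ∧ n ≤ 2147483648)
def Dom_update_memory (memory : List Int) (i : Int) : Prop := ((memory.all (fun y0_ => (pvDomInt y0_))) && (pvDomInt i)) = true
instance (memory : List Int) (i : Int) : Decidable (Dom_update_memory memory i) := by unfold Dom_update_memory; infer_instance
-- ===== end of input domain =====

-- B replaces A's one-block-at-a-time round-robin loop by a closed-form single pass over the n cells,
-- adding blocks // n everywhere plus one extra to the first blocks % n cells after i.
-- Both Pythons mutate `memory` in place identically; the equivalence proved here is about the return value.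

-- ===== PORT A =====
def update_memory (memory : List Int) (i : Int) : List Int :=
  let blocks := PySem.List.pyGetD memory i 0        -- memory[i]; total under Pre_ (InRange)
  let mem0 := PySem.List.pySetD memory i 0
  let i1 : Int := i + 1
  let i2 : Int := if i1 = (mem0.length : Int) then 0 else i1
  ((PySem.List.pyRange 0 blocks 1).foldl
    (fun (s : List Int × Int) (_b : Int) =>
      let mem := PySem.List.pySetD s.1 s.2 (PySem.List.pyGetD s.1 s.2 0 + 1)
      let i' := s.2 + 1
      (mem, if i' = (mem.length : Int) then 0 else i'))
    (mem0, i2)).1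

-- ===== PORT B =====
def update_memory_alt (memory : List Int) (i : Int) : List Int :=
  let n : Int := (memory.length : Int)
  let blocks := PySem.List.pyGetD memory i 0        -- memory[i]; total under Pre_ (InRange)
  let mem0 := PySem.List.pySetD memory i 0
  if 0 < blocks then
    let q := PySem.Int.floordiv blocks n
    let r := PySem.Int.mod blocks n
    let start := PySem.Int.mod (i + 1) n
    (PySem.List.pyRange 0 n 1).foldl
      (fun mem j =>
        PySem.List.pySetD mem (PySem.Int.mod (start + j) n)
          (PySem.List.pyGetD mem (PySem.Int.mod (start + j) n) 0 +
            (q + if j < r then 1 else 0)))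
      mem0
  else mem0

-- ===== PRECONDITION & SPEC =====
-- Pre_ excludes exactly the inputs where Python A raises IndexError (index out of range, incl. the empty list).
def Pre_update_memory (memory : List Int) (i : Int) : Prop := PySem.Raise.InRange memory.length i
instance (memory : List Int) (i : Int) : Decidable (Pre_update_memory memory i) := by unfold Pre_update_memory; infer_instance
def pvWitness_update_memory : List Int × Int := ([0, 2, 7, 0], 1)
def Spec_update_memory (memory : List Int) (i : Int) (out : List Int) : Prop := out = update_memory_alt memory i
instance (memory : List Int) (i : Int) (out : List Int) : Decidable (Spec_update_memory memory i out) := by unfold Spec_update_memory; infer_instance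

-- ===== CLAIM (what is proved, stated in full; the proofs are below) =====
def Claim_equal_update_memory : Prop := ∀ (memory : List Int) (i : Int), Dom_update_memory memory i → Pre_update_memory memory i → Spec_update_memory memory i (update_memory memory i)

-- ===== LEMMAS AND PROOFS =====

theorem pv_emod_neg (n : Nat) (i : Int) (h1 : -(n:Int) ≤ i) (h2 : i < 0) :
    i % (n : Int) = i + n := by
  have h := Int.add_mul_emod_self_left (a := i) (b := (n : Int)) (c := 1)
  rw [mul_one] at h
  rw [← h]
  exact Int.emod_eq_of_lt (by omega) (by omega)

theorem pv_pyIdx_emod (n : Nat) (i : Int) (h1 : -(n:Int) ≤ i) (h2 : i < (n:Int)) :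
    PySem.List.pyIdx? n i = some ((i % (n : Int)).toNat) := by
  unfold PySem.List.pyIdx?
  by_cases ha : 0 ≤ i
  · rw [if_pos ha, if_pos h2, Int.emod_eq_of_lt ha h2]
  · rw [if_neg ha, if_pos h1, pv_emod_neg n i h1 (by omega)]
    congr 1
    omega

theorem pv_pySetD_emod (xs : List Int) (i : Int) (v : Int)
    (h1 : -(xs.length : Int) ≤ i) (h2 : i < (xs.length : Int)) :
    PySem.List.pySetD xs i v = xs.set ((i % (xs.length : Int)).toNat) v := by
  unfold PySem.List.pySetD PySem.List.pySet?
  rw [pv_pyIdx_emod _ _ h1 h2]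
  rfl

theorem pv_pyGetD_emod (xs : List Int) (i : Int) (d : Int)
    (h1 : -(xs.length : Int) ≤ i) (h2 : i < (xs.length : Int)) :
    PySem.List.pyGetD xs i d = (xs[(i % (xs.length : Int)).toNat]?).getD d := by
  unfold PySem.List.pyGetD PySem.List.pyGet?
  rw [pv_pyIdx_emod _ _ h1 h2]
  rfl

theorem pv_emod_toNat_lt (n : Nat) (hn : 0 < n) (i : Int) : (i % (n : Int)).toNat < n := by
  have h1 : 0 ≤ i % (n : Int) := Int.emod_nonneg i (by omega)
  have h2 : i % (n : Int) < n := Int.emod_lt_of_pos i (by exact_mod_cast hn)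
  omega

-- A's loop body as a function of the state (memory, index)
def pvAStep : List Int × Int → List Int × Int := fun s =>
  let mem := PySem.List.pySetD s.1 s.2 (PySem.List.pyGetD s.1 s.2 0 + 1)
  let i' := s.2 + 1
  (mem, if i' = (mem.length : Int) then 0 else i')

theorem pv_foldl_A (l : List Int) (s : List Int × Int) :
    l.foldl
      (fun (s : List Int × Int) (_b : Int) =>
        (PySem.List.pySetD s.1 s.2 (PySem.List.pyGetD s.1 s.2 0 + 1),
         if s.2 + 1 = ((PySem.List.pySetD s.1 s.2 (PySem.List.pyGetD s.1 s.2 0 + 1)).length : Int)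
         then 0 else s.2 + 1))
      s = pvAStep^[l.length] s := by
  induction l generalizing s with
  | nil => rfl
  | cons x t ih =>
    rw [List.foldl_cons, List.length_cons, Function.iterate_succ_apply]
    exact ih _

-- number of hits of cell m when k single blocks are dropped starting at cell p, wrapping mod n
def cntHits (n : Nat) : Nat → Nat → Nat → Nat
  | _, 0, _ => 0
  | p, k+1, m => (if p = m then 1 else 0) + cntHits n ((p+1) % n) k m

-- distance from p to m going forward mod n (for p, m < n)
def dIdx (n p m : Nat) : Nat := if p ≤ m then m - p else m + n - p

theorem pv_cntHits_le (n : Nat) (hn : 0 < n) (m : Nat) (hm : m < n) :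
    ∀ (k p : Nat), k ≤ n → p < n → cntHits n p k m = if dIdx n p m < k then 1 else 0 := by
  intro k
  induction k with
  | zero => intro p _ _; simp [cntHits]
  | succ k ih =>
    intro p hk hp
    have hmod : (p + 1) % n = if p + 1 = n then 0 else p + 1 := by
      split_ifs with h
      · rw [h, Nat.mod_self]
      · exact Nat.mod_eq_of_lt (by omega)
    rw [cntHits, ih ((p+1) % n) (by omega) (by rw [hmod]; split_ifs <;> omega)]
    rw [hmod]
    unfold dIdx
    split_ifs <;> omega

theorem pv_cntHits_split (n : Nat) (hn : 0 < n) (m : Nat) :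
    ∀ (a p b : Nat), p < n →
      cntHits n p (a + b) m = cntHits n p a m + cntHits n ((p + a) % n) b m := by
  intro a
  induction a with
  | zero => intro p b hp; simp [cntHits, Nat.mod_eq_of_lt hp]
  | succ a ih =>
    intro p b hp
    rw [show a + 1 + b = (a + b) + 1 from by omega]
    rw [cntHits, ih ((p+1) % n) b (Nat.mod_lt _ hn)]
    conv_rhs => rw [cntHits]
    rw [Nat.mod_add_mod, show p + 1 + a = p + (a + 1) from by omega]
    omega

theorem pv_dIdx_lt (n p m : Nat) (hp : p < n) (hm : m < n) : dIdx n p m < n := by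
  unfold dIdx; split_ifs <;> omega

theorem pv_cntHits_full (n : Nat) (hn : 0 < n) (m : Nat) (hm : m < n) :
    ∀ (q r p : Nat), r < n → p < n →
      cntHits n p (q * n + r) m = q + (if dIdx n p m < r then 1 else 0) := by
  intro q
  induction q with
  | zero =>
    intro r p hr hp
    simpa using pv_cntHits_le n hn m hm r p (by omega) hp
  | succ q ih =>
    intro r p hr hp
    rw [show (q + 1) * n + r = n + (q * n + r) from by ring]
    rw [pv_cntHits_split n hn m n p (q * n + r) hp]
    rw [show (p + n) % n = p from by rw [Nat.add_mod_right]; exact Nat.mod_eq_of_lt hp]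
    rw [ih r p hr hp,
        pv_cntHits_le n hn m hm n p (le_refl n) hp,
        if_pos (pv_dIdx_lt n p m hp hm)]
    omega

theorem pv_sum_map_zero (n : Nat) (f : Nat → Int) (hz : ∀ j, j < n → f j = 0) :
    ((List.range n).map f).sum = 0 := by
  induction n with
  | zero => rfl
  | succ n ih =>
    rw [List.range_succ, List.map_append, List.sum_append]
    simp [ih (fun j hj => hz j (by omega)), hz n (by omega)]

theorem pv_sum_ite_single (n : Nat) (f : Nat → Int) (j0 : Nat) (hj : j0 < n)
    (hz : ∀ j, j < n → j ≠ j0 → f j = 0) : ((List.range n).map f).sum = f j0 := by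
  induction n with
  | zero => omega
  | succ n ih =>
    rw [List.range_succ, List.map_append, List.sum_append]
    simp only [List.map_cons, List.map_nil, List.sum_cons, List.sum_nil, add_zero]
    by_cases h : n = j0
    · rw [pv_sum_map_zero n f (fun j hjn => hz j (by omega) (by omega))]
      simp [h]
    · rw [ih (by omega) (fun j hjn hne => hz j (by omega) hne), hz n (by omega) h]
      simp

theorem pv_mod_two_cases (x n : Nat) (hn : 0 < n) (h : x < 2 * n) :
    x % n = if x < n then x else x - n := by
  split_ifs with hx
  · exact Nat.mod_eq_of_lt hx
  · rw [Nat.mod_eq_sub_mod (by omega)]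
    exact Nat.mod_eq_of_lt (by omega)

theorem pv_hit_iff (n p m j : Nat) (hn : 0 < n) (hp : p < n) (hm : m < n) (hj : j < n) :
    ((p + j) % n = m ↔ j = dIdx n p m) := by
  rw [pv_mod_two_cases (p + j) n hn (by omega)]
  unfold dIdx
  split_ifs <;> omega

-- the loop index after one step of A has the residue one further on
theorem pv_next_emod (n : Nat) (hn : 0 < n) (ii : Int)
    (h1 : -(n:Int) < ii) (h2 : ii < (n:Int)) :
    (((if ii + 1 = (n:Int) then 0 else ii + 1) % (n:Int)).toNat)
      = ((ii % (n:Int)).toNat + 1) % n := by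
  have hpn : 0 ≤ ii % (n:Int) := Int.emod_nonneg ii (by omega)
  have hplt : ii % (n:Int) < n := Int.emod_lt_of_pos ii (by exact_mod_cast hn)
  have hkey : (ii + 1) % (n:Int) = ((((ii % (n:Int)).toNat + 1) % n : Nat) : Int) := by
    have hdecomp : ii + 1 = (((ii % (n:Int)).toNat : Int) + 1) + (n:Int) * (ii / (n:Int)) := by
      have := Int.emod_add_ediv ii (n:Int)
      omega
    rw [hdecomp, Int.add_mul_emod_self_left]
    norm_cast
  split_ifs with h
  · have hii : ii % (n:Int) = (n:Int) - 1 := by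
      rw [show ii = (n:Int) - 1 from by omega]
      exact Int.emod_eq_of_lt (by omega) (by omega)
    rw [hii]
    simp only [Int.zero_emod, Int.toNat_zero]
    rw [show ((n:Int) - 1).toNat + 1 = n from by omega, Nat.mod_self]
  · rw [hkey]
    exact Int.toNat_natCast _

-- pointwise characterisation of A's loop
theorem pv_A_iter (n : Nat) (hn : 0 < n) (m : Nat) :
    ∀ (k : Nat) (mem : List Int) (ii : Int), mem.length = n →
      -(n:Int) < ii → ii < (n:Int) →
      (pvAStep^[k] (mem, ii)).1[m]? =
        mem[m]?.map (· + (cntHits n ((ii % (n:Int)).toNat) k m : Int)) := by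
  intro k
  induction k with
  | zero =>
    intro mem ii h1 h2 h3
    simp only [Function.iterate_zero_apply, cntHits]
    rcases h : mem[m]? with _ | v <;> simp [h]
  | succ k ih =>
    intro mem ii h1 h2 h3
    have hIn1 : -(mem.length : Int) ≤ ii := by omega
    have hIn2 : ii < (mem.length : Int) := by omega
    have hp : (ii % (n:Int)).toNat < n := pv_emod_toNat_lt n hn ii
    have hsd : PySem.List.pySetD mem ii (PySem.List.pyGetD mem ii 0 + 1)
        = mem.set ((ii % (n:Int)).toNat) ((mem[(ii % (n:Int)).toNat]?).getD 0 + 1) := by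
      rw [pv_pySetD_emod _ _ _ hIn1 hIn2, pv_pyGetD_emod _ _ _ hIn1 hIn2, h1]
    have hstep : pvAStep (mem, ii)
        = (mem.set ((ii % (n:Int)).toNat) ((mem[(ii % (n:Int)).toNat]?).getD 0 + 1),
           if ii + 1 = (n:Int) then 0 else ii + 1) := by
      show (PySem.List.pySetD mem ii (PySem.List.pyGetD mem ii 0 + 1),
        if ii + 1 = ((PySem.List.pySetD mem ii (PySem.List.pyGetD mem ii 0 + 1)).length : Int)
        then 0 else ii + 1) = _
      rw [hsd]
      simp [h1]
    rw [Function.iterate_succ_apply, hstep]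
    rw [ih _ _ (by simp [h1]) (by split_ifs <;> omega) (by split_ifs <;> omega)]
    rw [pv_next_emod n hn ii h2 h3]
    rw [List.getElem?_set]
    rw [cntHits]
    by_cases hpm : (ii % (n:Int)).toNat = m
    · rw [if_pos hpm, if_pos (by omega : (ii % (n:Int)).toNat < mem.length)]
      have hmlt : m < mem.length := by omega
      rw [List.getElem?_eq_getElem hmlt, hpm, List.getElem?_eq_getElem hmlt]
      simp only [Option.getD_some, Option.map_some, Option.some.injEq]
      push_cast
      ring
    · rw [if_neg hpm, if_neg hpm]
      rcases h : mem[m]? with _ | v <;> simp [h]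

-- pointwise characterisation of B's single pass
theorem pv_B_fold (n : Nat) (hn : 0 < n) (start q r : Int) :
    ∀ (ts : List Int) (mem : List Int) (m : Nat), mem.length = n →
      (ts.foldl
        (fun mem j =>
          PySem.List.pySetD mem ((start + j) % (n:Int))
            (PySem.List.pyGetD mem ((start + j) % (n:Int)) 0 +
              (q + if j < r then 1 else 0)))
        mem)[m]? =
      mem[m]?.map (· + (ts.map
        (fun j => if ((start + j) % (n:Int)).toNat = m
                  then (q + if j < r then 1 else 0) else 0)).sum) := by
  intro ts
  induction ts with
  | nil =>
    intro mem m hlen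
    rcases h : mem[m]? with _ | v <;> simp [h]
  | cons t ts ih =>
    intro mem m hlen
    have hnn : 0 ≤ (start + t) % (n:Int) := Int.emod_nonneg _ (by omega)
    have hlt : (start + t) % (n:Int) < (n:Int) := Int.emod_lt_of_pos _ (by exact_mod_cast hn)
    have hgt : ((start + t) % (n:Int)).toNat < mem.length := by omega
    simp only [List.foldl_cons, List.map_cons, List.sum_cons]
    rw [PySem.List.pyGetD_eq_getElem mem 0 hnn (by omega),
        PySem.List.pySetD_of_nonneg mem _ hnn]
    rw [ih _ _ (by simp [hlen])]
    rw [List.getElem?_set]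
    by_cases hpm : ((start + t) % (n:Int)).toNat = m
    · rw [if_pos hpm, if_pos (by omega), if_pos hpm]
      rw [← hpm, List.getElem?_eq_getElem hgt]
      simp only [Option.map_some, Option.some.injEq]
      ring
    · rw [if_neg hpm, if_neg hpm]
      rcases h : mem[m]? with _ | v <;> simp [h]

theorem update_memory_spec : Claim_equal_update_memory := by
  intro memory i _hDom hPre
  obtain ⟨hl, hr⟩ := hPre
  unfold Spec_update_memory
  have hn : 0 < memory.length := by omega
  have hnz : (0:Int) < (memory.length : Int) := by exact_mod_cast hn
  simp only [update_memory, update_memory_alt]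
  rw [pv_pyGetD_emod memory i 0 hl hr, pv_pySetD_emod memory i 0 hl hr]
  set p0 := (i % (memory.length:Int)).toNat with hp0
  have hp0lt : p0 < memory.length := pv_emod_toNat_lt _ hn i
  set blocks := (memory[p0]?).getD 0 with hbk
  set base := memory.set p0 0 with hbase
  have hblen : base.length = memory.length := by rw [hbase, List.length_set]
  by_cases hpos : 0 < blocks
  · rw [if_pos hpos]
    set k := blocks.toNat with hkdef
    have hk : blocks = (k : Int) := by omega
    rw [pv_foldl_A, PySem.List.length_pyRange_one,
        show (blocks - 0).toNat = k from by omega]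
    simp only [PySem.Int.mod_eq_emod_of_pos hnz, PySem.Int.floordiv_eq_ediv_of_pos hnz]
    set i2 := if i + 1 = (base.length : Int) then 0 else i + 1 with hi2
    have hb1 : -(memory.length:Int) < i2 := by rw [hi2]; split_ifs <;> omega
    have hb2 : i2 < (memory.length:Int) := by rw [hi2]; split_ifs <;> omega
    apply List.ext_getElem?
    intro m
    rw [pv_A_iter memory.length hn m k base i2 hblen hb1 hb2]
    rw [pv_B_fold memory.length hn ((i+1) % (memory.length:Int))
         (blocks / (memory.length:Int)) (blocks % (memory.length:Int))
         (PySem.List.pyRange 0 (memory.length:Int) 1) base m hblen]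
    have hstart_eq : i2 % (memory.length:Int) = (i+1) % (memory.length:Int) := by
      rw [hi2, hblen]
      split_ifs with h
      · rw [h, Int.emod_self, Int.zero_emod]
      · rfl
    by_cases hm : m < memory.length
    · set P := ((i+1) % (memory.length:Int)).toNat with hP
      have hPlt : P < memory.length := pv_emod_toNat_lt _ hn _
      have hPcast : (i+1) % (memory.length:Int) = (P:Int) :=
        (Int.toNat_of_nonneg (Int.emod_nonneg _ (by omega))).symm
      have hidx : ∀ j : Nat, ((i+1) % (memory.length:Int) + (j:Int)) % (memory.length:Int)
          = (((P + j) % memory.length : Nat) : Int) := by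
        intro j
        rw [hPcast, show (P:Int) + (j:Int) = ((P + j : Nat) : Int) from by push_cast; ring,
            ← Int.natCast_mod]
      have key : (cntHits memory.length ((i2 % (memory.length:Int)).toNat) k m : Int)
          = ((PySem.List.pyRange 0 (memory.length:Int) 1).map
              (fun j => if (((i+1) % (memory.length:Int) + j) % (memory.length:Int)).toNat = m
                        then (blocks / (memory.length:Int) + if j < blocks % (memory.length:Int) then 1 else 0)
                        else 0)).sum := by
        rw [hstart_eq, ← hP]
        rw [PySem.List.pyRange_one, List.map_map]
        simp only [Function.comp_def, zero_add, sub_zero, Int.toNat_natCast]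
        rw [pv_sum_ite_single memory.length _ (dIdx memory.length P m)
              (pv_dIdx_lt memory.length P m hPlt hm)
              (by
                intro j hjlt hne
                rw [hidx j, Int.toNat_natCast,
                    if_neg (fun hcontr =>
                      hne ((pv_hit_iff memory.length P m j hn hPlt hm hjlt).mp hcontr))])]
        rw [hidx (dIdx memory.length P m), Int.toNat_natCast,
            if_pos ((pv_hit_iff memory.length P m (dIdx memory.length P m) hn hPlt hm
                      (pv_dIdx_lt memory.length P m hPlt hm)).mpr rfl)]
        rw [show k = (k / memory.length) * memory.length + k % memory.length from by
              rw [mul_comm]; exact (Nat.div_add_mod k memory.length).symm]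
        rw [pv_cntHits_full memory.length hn m hm (k / memory.length) (k % memory.length) P
              (Nat.mod_lt _ hn) hPlt]
        rw [hk, ← Int.natCast_div, ← Int.natCast_mod]
        by_cases hd : dIdx memory.length P m < k % memory.length
        · rw [if_pos hd, if_pos (by exact_mod_cast hd)]
          push_cast
          ring
        · rw [if_neg hd, if_neg (by
              intro hcontr
              exact hd (by exact_mod_cast hcontr))]
          push_cast
          ring
      rw [key]
    · rw [List.getElem?_eq_none (by omega), Option.map_none, Option.map_none]
  · rw [if_neg hpos, PySem.List.pyRange_one_eq_nil (by omega : blocks ≤ (0:Int)),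
        List.foldl_nil]
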